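-- pv_equiv track=rewrite | github.com/soo5717/2021-Algorithm-Study | Programmers/eugene/35_week/모음사전.py | solution
-- ===== SOURCE A (Python) =====
-- def solution(word):
--     answer = 0
--     alphabet={"A":0, "E":1, "I":2, "O":3, "U":4}
--
--     for i in range(len(word)):
--         for j in range(4, i, -1):
--             answer += 5 ** (j-i) * alphabet[word[i]]
--         answer += 1 + alphabet[word[i]]
--     return answer
-- ===== SOURCE B (Python) =====
-- def solution(word):
--     alphabet = {"A": 0, "E": 1, "I": 2, "O": 3, "U": 4}
--     total = 0
--     for i, ch in enumerate(word):
--         v = alphabet[ch]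
--         if i <= 4:
--             total += v * ((5 ** (5 - i) - 1) // 4) + 1
--         else:
--             total += v + 1
--     return total
-- ===== Notes on version B (the rewrite author's own statement) =====
-- stated objective: simpler
-- what changed: B replaces A's inner geometric-series loop (summing 5**(j-i) for j=4..i+1) by its closed form (5**(5-i)-1)//4 per character, making a single pass with one weight per position.
import Mathlib
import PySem

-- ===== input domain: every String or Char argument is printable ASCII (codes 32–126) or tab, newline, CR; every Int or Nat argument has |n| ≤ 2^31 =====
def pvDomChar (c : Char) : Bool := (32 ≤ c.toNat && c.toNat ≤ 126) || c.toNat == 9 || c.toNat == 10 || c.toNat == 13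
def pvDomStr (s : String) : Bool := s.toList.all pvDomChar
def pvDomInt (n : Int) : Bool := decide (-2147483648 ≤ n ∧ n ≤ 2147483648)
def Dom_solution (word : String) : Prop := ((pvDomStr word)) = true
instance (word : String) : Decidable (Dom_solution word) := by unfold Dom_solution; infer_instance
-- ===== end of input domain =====

-- B replaces A's inner geometric-series loop by its closed form, one weight per character (objective: simpler).

-- ===== PORT A =====
def pvAlphabetA : PySem.Dict Char Int :=
  ((((PySem.Dict.empty.insert 'A' 0).insert 'E' 1).insert 'I' 2).insert 'O' 3).insert 'U' 4

-- `alphabet[word[i]]` is Dict.get? of Str.pyGet?; the `.getD` defaults are unreachable under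
-- Pre_solution (i is always in range; a non-vowel char is Python's KeyError, excluded by Pre_).
-- `5 ** (j-i)`: j - i ≥ 1 inside the inner range, so `.toNat` is exact there.
def solution (word : String) : Int :=
  (PySem.List.pyRange 0 (PySem.Str.len word)).foldl (fun answer i =>
    let answer :=
      (PySem.List.pyRange 4 i (-1)).foldl
        (fun a j => a + 5 ^ (j - i).toNat *
          (pvAlphabetA.get? ((PySem.Str.pyGet? word i).getD 'A')).getD 0) answer
    answer + 1 + (pvAlphabetA.get? ((PySem.Str.pyGet? word i).getD 'A')).getD 0) 0

-- ===== PORT B =====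
-- B's `alphabet` is the same literal dict; the ports share its definition (pvAlphabetA).
-- `(5 ** (5 - i) - 1) // 4`: exponent 5 - i ≥ 1 in the taken branch, so `.toNat` is exact.
def solution_alt (word : String) : Int :=
  (PySem.List.enumerate word.toList).foldl (fun total p =>
    let v := (pvAlphabetA.get? p.2).getD 0
    total + (if p.1 ≤ 4 then v * PySem.Int.floordiv (5 ^ (5 - p.1).toNat - 1) 4 + 1
             else v + 1)) 0

-- ===== PRECONDITION & SPEC =====
-- Pre_ excludes exactly the words containing a non-vowel character, on which Python A
-- raises KeyError (so does Python B).
def Pre_solution (word : String) : Prop :=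
  (word.toList.all fun c => c == 'A' || c == 'E' || c == 'I' || c == 'O' || c == 'U') = true
instance (word : String) : Decidable (Pre_solution word) := by unfold Pre_solution; infer_instance

def pvWitness_solution : String := "EIO"

def Spec_solution (word : String) (out : Int) : Prop := out = solution_alt word
instance (word : String) (out : Int) : Decidable (Spec_solution word out) := by unfold Spec_solution; infer_instance

-- ===== CLAIM (what is proved, stated in full; the proofs are below) =====
def Claim_equal_solution : Prop := ∀ (word : String), Dom_solution word → Pre_solution word → Spec_solution word (solution word)

-- ===== LEMMAS AND PROOFS =====

-- the vowel value and B's per-position weight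
def pvVal (c : Char) : Int := (pvAlphabetA.get? c).getD 0
def pvContrib (i v : Int) : Int :=
  if i ≤ 4 then v * PySem.Int.floordiv (5 ^ (5 - i).toNat - 1) 4 + 1 else v + 1

-- A's iteration for index i (inner geometric loop, then `+ 1 + v`) adds exactly pvContrib i v
theorem pv_step (i : Int) (hi : 0 ≤ i) (v acc : Int) :
    ((PySem.List.pyRange 4 i (-1)).foldl (fun a j => a + 5 ^ (j - i).toNat * v) acc) + 1 + v
      = acc + pvContrib i v := by
  by_cases h4 : 4 ≤ i
  · have he : PySem.List.pyRange 4 i (-1) = [] := by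
      simp [PySem.List.pyRange]; omega
    rw [he]
    by_cases h4' : i ≤ 4
    · have : i = 4 := le_antisymm h4' h4
      subst this
      simp [pvContrib, List.foldl]
      ring
    · simp [pvContrib, h4', List.foldl]; ring
  · rw [not_le] at h4
    interval_cases i <;>
      · simp only [pvContrib, List.foldl,
          show PySem.List.pyRange 4 0 (-1) = [4, 3, 2, 1] from by decide,
          show PySem.List.pyRange 4 1 (-1) = [4, 3, 2] from by decide,
          show PySem.List.pyRange 4 2 (-1) = [4, 3] from by decide,
          show PySem.List.pyRange 4 3 (-1) = [4] from by decide]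
        rw [if_pos (by norm_num), PySem.Int.floordiv_eq_ediv_of_pos (by norm_num)]
        norm_num [show ((5:Int)).toNat = 5 from rfl, show ((4:Int)).toNat = 4 from rfl,
          show ((3:Int)).toNat = 3 from rfl, show ((2:Int)).toNat = 2 from rfl,
          show ((1:Int)).toNat = 1 from rfl]
        omega

theorem pv_A_sum (word : String) :
    solution word
      = ((PySem.List.pyRange 0 word.toList.length).map
          (fun i => pvContrib i (pvVal ((PySem.Str.pyGet? word i).getD 'A')))).sum := by
  unfold solution
  rw [show PySem.Str.len word = (word.toList.length : Int) from by simp [pysem]]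
  trans (List.foldl
      (fun (acc i : Int) => acc + pvContrib i (pvVal ((PySem.Str.pyGet? word i).getD 'A')))
      0 (PySem.List.pyRange 0 (word.toList.length : Int)))
  · apply PySem.List.foldl_congr_mem
    intro acc i hi
    exact pv_step i (PySem.List.mem_pyRange_one.mp hi).1 _ acc
  · rw [PySem.List.foldl_add]; simp

theorem pv_B_sum (word : String) :
    solution_alt word
      = ((PySem.List.enumerate word.toList).map (fun p => pvContrib p.1 (pvVal p.2))).sum := by
  unfold solution_alt
  trans (List.foldl (fun (total : Int) (p : Int × Char) => total + pvContrib p.1 (pvVal p.2))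
      0 (PySem.List.enumerate word.toList))
  · apply PySem.List.foldl_congr_mem
    intro acc p _
    rfl
  · rw [PySem.List.foldl_add]; simp

-- ===== VERDICT (by name: the statement is the Claim_ definition above) =====
theorem solution_spec : Claim_equal_solution := by
  intro word _ _
  unfold Spec_solution
  rw [pv_A_sum, pv_B_sum, PySem.List.enumerate_eq_map_pyRange word.toList 'A', List.map_map]
  simp only [PySem.List.len]
  apply congrArg List.sum
  apply List.map_congr_left
  intro i hi
  have h := PySem.List.mem_pyRange_one.mp hi
  simp only [Function.comp]
  have hlt : i < (word.toList.length : Int) := h.2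
  rw [show PySem.Str.pyGet? word i = PySem.List.pyGet? word.toList i from by simp [pysem],
      PySem.List.pyGet?_eq_some_getElem word.toList h.1 hlt,
      PySem.List.pyGetD_eq_getElem word.toList 'A' h.1 hlt]
  rfl
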